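-- pv_equiv track=rewrite | github.com/Roktar/codewars | csv_array.py | toCsvText
-- ===== SOURCE A (Python) =====
-- def toCsvText(array) :
--     s = ""
--
--     for i in range(len(array)) :
--         for j in range(len(array[i])) :
--             s += str(array[i][j])
--             if j != len(array[i])-1 :
--                 s += ','
--             else :
--                 s += '\n'
--
--     return s[0:len(s)-1]
-- ===== SOURCE B (Python) =====
-- def toCsvText(array):
--     return "\n".join(",".join(str(x) for x in row) for row in array if row)
-- ===== Notes on version B (the rewrite author's own statement) =====
-- stated objective: idiomatic
-- what changed: Replaces the character-by-character accumulation with per-cell index checks and a final trailing-character slice by two nested str.join calls over a generator that skips empty rows.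
import Mathlib
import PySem

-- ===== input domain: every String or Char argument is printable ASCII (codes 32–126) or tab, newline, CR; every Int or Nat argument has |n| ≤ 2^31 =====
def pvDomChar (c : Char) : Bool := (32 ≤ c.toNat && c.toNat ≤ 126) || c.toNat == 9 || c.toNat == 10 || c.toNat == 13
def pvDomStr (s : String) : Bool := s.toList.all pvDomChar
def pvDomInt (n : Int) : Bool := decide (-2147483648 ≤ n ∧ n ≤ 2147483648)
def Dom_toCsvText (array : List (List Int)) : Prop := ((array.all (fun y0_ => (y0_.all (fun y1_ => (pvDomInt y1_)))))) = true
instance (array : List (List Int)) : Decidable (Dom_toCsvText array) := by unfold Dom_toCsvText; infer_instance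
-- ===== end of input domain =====

-- B replaces A's per-cell index-checked accumulation and trailing-character slice by two nested joins (',' within rows, '\n' between nonempty rows) — more idiomatic, same cost.


-- ===== PORT A =====
-- inner loop of A: for j in range(len(array[i])): s += str(row[j]); s += ',' or '\n'
def pvStep (row : List Int) (s : List Char) (j : Int) : List Char :=
  let s := s ++ PySem.Int.toChars (PySem.List.pyGetD row j 0)
  if j ≠ (PySem.List.len row) - 1 then s ++ [','] else s ++ ['\n']

def pvRowLoop (row : List Int) (s : List Char) : List Char :=
  (PySem.List.pyRange 0 (PySem.List.len row)).foldl (pvStep row) s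

def toCsvText (array : List (List Int)) : String :=
  let s := (PySem.List.pyRange 0 (PySem.List.len array)).foldl
    (fun s i => pvRowLoop (PySem.List.pyGetD array i []) s) ([] : List Char)
  -- return s[0:len(s)-1]
  String.ofList (PySem.List.slice s (some 0) (some ((s.length : Int) - 1)))

-- ===== PORT B =====
def toCsvText_alt (array : List (List Int)) : String :=
  PySem.Str.join "\n"
    ((array.filter (fun row => !row.isEmpty)).map
      (fun row => PySem.Str.join "," (row.map PySem.Int.toStr)))

-- ===== PRECONDITION & SPEC =====
def Spec_toCsvText (array : List (List Int)) (out : String) : Prop := out = toCsvText_alt array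
instance (array : List (List Int)) (out : String) : Decidable (Spec_toCsvText array out) := by unfold Spec_toCsvText; infer_instance

-- ===== CLAIM (what is proved, stated in full; the proofs are below) =====
def Claim_equal_toCsvText : Prop := ∀ (array : List (List Int)), Dom_toCsvText array → Spec_toCsvText array (toCsvText array)

-- ===== LEMMAS AND PROOFS =====

-- the characters a nonempty row contributes, without the trailing separator
def pvRowChars (row : List Int) : List Char :=
  PySem.Chars.join [','] (row.map PySem.Int.toChars)

-- what A's inner loop appends for one row
def pvG (row : List Int) : List Char :=
  if row = [] then [] else pvRowChars row ++ ['\n']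

theorem pvRowLoop_go (row : List Int) : ∀ (k : Nat) (s : List Char), k ≤ row.length →
    (PySem.List.pyRange (k : Int) ((row.length : Int))).foldl (pvStep row) s
    = s ++ (if row.drop k = [] then []
            else PySem.Chars.join [','] ((row.drop k).map PySem.Int.toChars) ++ ['\n']) := by
  intro k
  induction h : row.length - k generalizing k with
  | zero =>
    intro s hk
    have hk' : k = row.length := by omega
    have hrange : PySem.List.pyRange (k : Int) ((row.length : Int)) = [] := by
      simp [PySem.List.pyRange, hk']
    rw [hrange]
    simp [hk']
  | succ n ih =>
    intro s hk
    have hklt : k < row.length := by omega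
    rw [PySem.List.pyRange_one_cons (by exact_mod_cast hklt), List.foldl_cons]
    have hget : PySem.List.pyGetD row (k : Int) 0 = row[k] := by
      rw [PySem.List.pyGetD_natCast]; simp [hklt]
    have hdrop : row.drop k = row[k] :: row.drop (k + 1) := List.drop_eq_getElem_cons hklt
    have hcast : ((k : Int) + 1) = ((k + 1 : Nat) : Int) := by push_cast; ring
    by_cases hlast : k = row.length - 1
    · have hdrop1 : row.drop (k + 1) = [] := by
        apply List.drop_eq_nil_of_le; omega
      have hstep : pvStep row s (k : Int) = s ++ PySem.Int.toChars row[k] ++ ['\n'] := by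
        simp only [pvStep, PySem.List.len, hget, ne_eq, ite_not]
        rw [if_pos (by omega)]
      rw [hstep, hcast, ih (k + 1) (by omega) _ (by omega)]
      simp [hdrop, hdrop1, PySem.Chars.join_singleton]
    · have hdrop1 : row.drop (k + 1) ≠ [] := by
        simp [List.drop_eq_nil_iff]; omega
      have hstep : pvStep row s (k : Int) = s ++ PySem.Int.toChars row[k] ++ [','] := by
        simp only [pvStep, PySem.List.len, hget, ne_eq, ite_not]
        rw [if_neg (by omega)]
      rw [hstep, hcast, ih (k + 1) (by omega) _ (by omega)]
      rw [hdrop]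
      obtain ⟨y, t, hyt⟩ := List.exists_cons_of_ne_nil hdrop1
      simp [hyt, PySem.Chars.join_cons_cons]

theorem pvRowLoop_eq (row : List Int) (s : List Char) :
    pvRowLoop row s = s ++ pvG row := by
  have := pvRowLoop_go row 0 s (Nat.zero_le _)
  simpa [pvRowLoop, pvG, pvRowChars, PySem.List.len] using this

theorem pvSlice_dropLast (s : List Char) :
    PySem.List.slice s (some 0) (some ((s.length : Int) - 1)) = s.dropLast := by
  cases s with
  | nil => rfl
  | cons c t =>
    simp [PySem.List.slice, PySem.List.clampIdx, List.dropLast_eq_take]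
    split_ifs <;> omega

theorem pvG_eq_nil_iff (row : List Int) : pvG row = [] ↔ row = [] := by
  unfold pvG
  split_ifs with h <;> simp [h]

theorem pvFlat_nil_iff (t : List (List Int)) :
    t.flatMap pvG = [] ↔ t.filter (fun row => !row.isEmpty) = [] := by
  induction t with
  | nil => simp
  | cons r t ih =>
    simp only [List.flatMap_cons, List.filter_cons, List.append_eq_nil_iff, ih]
    by_cases hr : r = []
    · simp [hr, pvG]
    · have : ¬ pvG r = [] := by rw [pvG_eq_nil_iff]; exact hr
      simp [this, hr]

theorem pvDropLast_flat (array : List (List Int)) :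
    (array.flatMap pvG).dropLast
      = PySem.Chars.join ['\n'] ((array.filter (fun row => !row.isEmpty)).map pvRowChars) := by
  induction array with
  | nil => simp [PySem.Chars.join_nil]
  | cons r t ih =>
    by_cases hr : r = []
    · simpa [hr, pvG, List.filter_cons, List.isEmpty_iff] using ih
    · have hfil : (r :: t).filter (fun row => !row.isEmpty)
          = r :: t.filter (fun row => !row.isEmpty) := by
        simp [hr]
      rw [hfil]
      simp only [List.flatMap_cons, pvG, if_neg hr]
      by_cases ht : t.filter (fun row => !row.isEmpty) = []
      · have hflat : t.flatMap pvG = [] := (pvFlat_nil_iff t).mpr ht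
        simp [hflat, ht, PySem.Chars.join_singleton]
      · have hflat : t.flatMap pvG ≠ [] := by
          intro h; exact ht ((pvFlat_nil_iff t).mp h)
        rw [List.dropLast_append_of_ne_nil hflat, ih]
        obtain ⟨q, rest, hq⟩ := List.exists_cons_of_ne_nil ht
        rw [hq]
        simp [PySem.Chars.join_cons_cons]

theorem pvAlt_toList (array : List (List Int)) :
    (toCsvText_alt array).toList
      = PySem.Chars.join ['\n'] ((array.filter (fun row => !row.isEmpty)).map pvRowChars) := by
  unfold toCsvText_alt
  rw [PySem.Str.toList_join]
  congr 1
  rw [List.map_map]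
  apply List.map_congr_left
  intro row _
  simp [PySem.Str.toList_join, pvRowChars, List.map_map, Function.comp_def,
        PySem.Int.toList_toStr]

-- ===== VERDICT (by name: the statement is the Claim_ definition above) =====
theorem toCsvText_spec : Claim_equal_toCsvText := by
  intro array _
  unfold Spec_toCsvText toCsvText
  apply String.toList_inj.mp
  have houter :
      (PySem.List.pyRange 0 (PySem.List.len array)).foldl
        (fun s i => pvRowLoop (PySem.List.pyGetD array i []) s) ([] : List Char)
      = array.flatMap pvG := by
    rw [show (0 : Int) = ((0 : Nat) : Int) from rfl]
    rw [PySem.List.foldl_pyRange_pyGetD array ([] : List Int)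
          (fun s row => pvRowLoop row s) ([] : List Char) (by norm_num)]
    simp
    have : ∀ (acc : List Char),
        array.foldl (fun s row => pvRowLoop row s) acc = acc ++ array.flatMap pvG := by
      intro acc
      simp only [pvRowLoop_eq]
      exact PySem.List.foldl_append_eq_flatMap pvG array acc
    simpa using this []
  rw [houter]
  rw [String.toList_ofList, pvSlice_dropLast, pvDropLast_flat, ← pvAlt_toList]
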